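-- pv_equiv track=rewrite | github.com/Mayoki-Mano/Default_Telegram_Bot | говно ебаное/slide-attack/decoder.py | do_permutation
-- ===== SOURCE A (Python) =====
-- def do_permutation(data_bytes, permutation):
--     subblocks = [(data_bytes >> i) & 0xFFFF for i in range(0, 48, 16)]
--     permuted_subblocks = [0] * 3
--     for i in range(3):
--         permuted_subblocks[i] = 0xFFFF
--         for j, bit_position in enumerate(permutation):
--             permuted_subblocks[i] &= ((((subblocks[i] >> 15 - j) & 0x1) << 15 - bit_position) ^ 0xFFFF)
--         permuted_subblocks[i] = permuted_subblocks[i] ^ 0xFFFF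
--     result = (permuted_subblocks[2] << 32) | (permuted_subblocks[1] << 16) | permuted_subblocks[0]
--     return result
-- ===== SOURCE B (Python) =====
-- def do_permutation(data_bytes, permutation):
--     # One parallel pass: treat data_bytes as a packed 48-bit word (three 16-bit
--     # lanes) and move the source bit of all three lanes at once per entry.
--     word = data_bytes & 0xFFFFFFFFFFFF
--     result = 0
--     for j, bit_position in enumerate(permutation):
--         if 0 <= bit_position < 16:
--             lanes = (word >> (15 - j)) & 0x000100010001
--             result |= lanes << (15 - bit_position)
--     return result
-- ===== Notes on version B (the rewrite author's own statement) =====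
-- stated objective: simpler
-- what changed: Replaces the nested per-subblock loop with AND-of-complements by a single pass over enumerate(permutation) that moves the source bit of all three 16-bit lanes at once through one packed 48-bit mask and ORs it into the result.
import Mathlib
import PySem

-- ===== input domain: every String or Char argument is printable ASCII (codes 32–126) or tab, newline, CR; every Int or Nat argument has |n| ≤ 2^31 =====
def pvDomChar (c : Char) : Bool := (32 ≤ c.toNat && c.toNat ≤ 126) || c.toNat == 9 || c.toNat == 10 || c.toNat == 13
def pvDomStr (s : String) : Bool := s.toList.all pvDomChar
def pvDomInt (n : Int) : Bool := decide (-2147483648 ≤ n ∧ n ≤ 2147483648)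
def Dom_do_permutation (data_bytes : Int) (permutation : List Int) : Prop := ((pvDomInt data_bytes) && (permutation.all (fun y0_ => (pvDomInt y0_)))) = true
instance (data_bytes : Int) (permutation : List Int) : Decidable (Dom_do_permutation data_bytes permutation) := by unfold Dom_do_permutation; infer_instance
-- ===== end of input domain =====

-- B replaces A's nested per-subblock loop (AND of complements, then XOR) by ONE pass over
-- enumerate(permutation) that moves the source bit of all three 16-bit lanes at once through
-- a packed 48-bit mask and ORs it into the result: simpler, one loop instead of three.

-- ===== PORT A =====
-- shifts: Python's a >> k / a << k with k ≥ 0 are Lean's >>> / <<< on a Nat count; Python raises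
-- on a negative count, which Pre_ excludes, so `.toNat` of the count is exact inside Pre_.
def do_permutation (data_bytes : Int) (permutation : List Int) : Int :=
  let subblocks := (PySem.List.pyRange 0 48 16).map fun i =>
    PySem.Int.band (data_bytes >>> i.toNat) 0xFFFF
  let permuted := (PySem.List.pyRange 0 3 1).foldl (fun ps i =>
    let v := (PySem.List.enumerate permutation).foldl (fun acc jb =>
      PySem.Int.band acc (PySem.Int.bxor
        ((PySem.Int.band ((PySem.List.pyGetD subblocks i 0) >>> (15 - jb.1).toNat) 1)
          <<< (15 - jb.2).toNat) 0xFFFF)) 0xFFFF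
    ps.set i.toNat (PySem.Int.bxor v 0xFFFF)) [0, 0, 0]
  PySem.Int.bor (PySem.Int.bor ((PySem.List.pyGetD permuted 2 0) <<< 32)
    ((PySem.List.pyGetD permuted 1 0) <<< 16)) (PySem.List.pyGetD permuted 0 0)

-- ===== PORT B =====
def do_permutation_alt (data_bytes : Int) (permutation : List Int) : Int :=
  let word := PySem.Int.band data_bytes 0xFFFFFFFFFFFF
  (PySem.List.enumerate permutation).foldl (fun (result : Int) (jb : Int × Int) =>
    if (0:Int) ≤ jb.2 ∧ jb.2 < 16 then
      PySem.Int.bor result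
        ((PySem.Int.band (word >>> (15 - jb.1).toNat) 0x000100010001) <<< (15 - jb.2).toNat)
    else result) 0

-- ===== PRECONDITION & SPEC =====
-- Pre_: exactly the inputs where Python A returns normally: a permutation longer than 16 makes
-- A shift by 15-16 < 0 (ValueError), and an entry > 15 makes A shift by a negative count too.
def Pre_do_permutation (data_bytes : Int) (permutation : List Int) : Prop :=
  permutation.length ≤ 16 ∧ ∀ bp ∈ permutation, bp ≤ 15
instance (data_bytes : Int) (permutation : List Int) : Decidable (Pre_do_permutation data_bytes permutation) := by unfold Pre_do_permutation; infer_instance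
def pvWitness_do_permutation : Int × List Int := (1193046, [3, 0, 15, 7])

def Spec_do_permutation (data_bytes : Int) (permutation : List Int) (out : Int) : Prop := out = do_permutation_alt data_bytes permutation
instance (data_bytes : Int) (permutation : List Int) (out : Int) : Decidable (Spec_do_permutation data_bytes permutation out) := by unfold Spec_do_permutation; infer_instance

-- ===== CLAIM (what is proved, stated in full; the proofs are below) =====
def Claim_equal_do_permutation : Prop := ∀ (data_bytes : Int) (permutation : List Int), Dom_do_permutation data_bytes permutation → Pre_do_permutation data_bytes permutation → Spec_do_permutation data_bytes permutation (do_permutation data_bytes permutation)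
-- ===== LEMMAS AND PROOFS =====

-- Nat-level models of the two loops (the ports compute their casts).
def pvBit (w k : Nat) : Nat := (w >>> k) &&& 1

def pvLaneA (s : Nat) (E : List (Int × Int)) (acc : Nat) : Nat :=
  E.foldl (fun acc jb => acc &&& ((pvBit s (15 - jb.1).toNat <<< (15 - jb.2).toNat) ^^^ 65535)) acc

def pvLaneO (s : Nat) (E : List (Int × Int)) (r : Nat) : Nat :=
  E.foldl (fun r jb => r ||| ((pvBit s (15 - jb.1).toNat <<< (15 - jb.2).toNat) &&& 65535)) r

def pvPackB (w : Nat) (E : List (Int × Int)) (R : Nat) : Nat :=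
  E.foldl (fun (R : Nat) (jb : Int × Int) => if (0:Int) ≤ jb.2 ∧ jb.2 < 16 then
      R ||| (((w >>> (15 - jb.1).toNat) &&& 4295032833) <<< (15 - jb.2).toNat)
    else R) R

-- masking an Int with an all-ones mask is taking the nonnegative residue
theorem pv_band_65535 (a : Int) : PySem.Int.band a 65535 = ((a % 65536).toNat : Int) := by
  simp only [PySem.Int.band]
  split_ifs with h1 h2 h2 <;>
    first
    | (rw [show ((65535:Int).toNat) = 2^16 - 1 from rfl, Nat.and_two_pow_sub_one_eq_mod]; omega)
    | (rw [show ((65535:Int).toNat) = 65535 from rfl, Nat.and_comm,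
          show (65535:Nat) = 2^16 - 1 from rfl, Nat.and_two_pow_sub_one_eq_mod]; omega)
    | omega

theorem pv_band_2p48 (a : Int) : PySem.Int.band a 281474976710655 = ((a % 281474976710656).toNat : Int) := by
  simp only [PySem.Int.band]
  split_ifs with h1 h2 h2 <;>
    first
    | (rw [show ((281474976710655:Int).toNat) = 2^48 - 1 from rfl, Nat.and_two_pow_sub_one_eq_mod]; omega)
    | (rw [show ((281474976710655:Int).toNat) = 281474976710655 from rfl, Nat.and_comm,
          show (281474976710655:Nat) = 2^48 - 1 from rfl, Nat.and_two_pow_sub_one_eq_mod]; omega)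
    | omega

-- the three 16-bit subblocks are the three lanes of the packed 48-bit word
theorem pv_lane_of_word (a : Int) (k : Nat) (hk : k = 0 ∨ k = 16 ∨ k = 32) :
    ((a >>> k) % 65536).toNat = ((a % 281474976710656).toNat >>> k) &&& 65535 := by
  rw [Int.shiftRight_eq_div_pow, Nat.shiftRight_eq_div_pow,
    show (65535:Nat) = 2^16 - 1 from rfl, Nat.and_two_pow_sub_one_eq_mod]
  rcases hk with rfl | rfl | rfl <;> norm_num <;> omega

theorem pv_testBit_one (k : Nat) : Nat.testBit 1 k = decide (k = 0) := by
  rcases k with _ | k <;> simp [Nat.testBit_succ]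

-- De Morgan step: AND with the complement, then final XOR, is OR of the 16-bit-masked bit
theorem pv_demorgan_step (acc x : Nat) (h : acc < 65536) :
    (acc &&& (x ^^^ 65535)) ^^^ 65535 = (acc ^^^ 65535) ||| (x &&& 65535) := by
  apply Nat.eq_of_testBit_eq; intro k
  rw [show (65535:Nat) = 2^16 - 1 by norm_num]
  by_cases hk : k < 16
  · simp only [Nat.testBit_xor, Nat.testBit_and, Nat.testBit_or, Nat.testBit_two_pow_sub_one, hk,
      decide_true, Bool.and_true, Bool.xor_true]
    cases hacc : acc.testBit k <;> cases hx : x.testBit k <;> simp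
  · have hacc : acc.testBit k = false := by
      apply Nat.testBit_lt_two_pow
      calc acc < 65536 := h
        _ = 2^16 := by norm_num
        _ ≤ 2^k := Nat.pow_le_pow_right (by norm_num) (by omega)
    simp only [Nat.testBit_xor, Nat.testBit_and, Nat.testBit_or, Nat.testBit_two_pow_sub_one, hk,
      decide_false, Bool.and_false, Bool.xor_false, hacc, Bool.false_and, Bool.false_or]

-- splitting the packed mask into the three lanes
theorem pv_and_split (w d : Nat) :
    (w >>> d) &&& 4295032833 =
      pvBit w d ||| (pvBit w (16 + d) <<< 16) ||| (pvBit w (32 + d) <<< 32) := by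
  rw [show (4295032833:Nat) = 1 ||| (1 <<< 16) ||| (1 <<< 32) by decide]
  apply Nat.eq_of_testBit_eq; intro k
  simp only [pvBit, Nat.testBit_and, Nat.testBit_or, Nat.testBit_shiftLeft,
    Nat.testBit_shiftRight, pv_testBit_one]
  by_cases h0 : k = 0
  · subst h0; simp
  · by_cases h16 : k = 16
    · subst h16; simp [Nat.add_comm]
    · by_cases h32 : k = 32
      · subst h32; simp [Nat.add_comm]
      · simp only [h0, decide_false, Bool.false_or]
        rcases Nat.lt_or_ge k 16 with hlt | hge
        · simp [Nat.not_le.mpr hlt, show ¬32 ≤ k by omega]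
        · rcases Nat.lt_or_ge k 32 with hlt2 | hge2
          · simp [hge, show ¬32 ≤ k by omega, show ¬(k - 16 = 0) by omega]
          · simp [hge, hge2, show ¬(k - 16 = 0) by omega, show ¬(k - 32 = 0) by omega]

theorem pv_bit_lane (w : Nat) (c d : Nat) (hd : d < 16) :
    pvBit ((w >>> c) &&& 65535) d = pvBit w (c + d) := by
  apply Nat.eq_of_testBit_eq; intro k
  rw [show (65535:Nat) = 2^16 - 1 by norm_num]
  simp only [pvBit, Nat.testBit_and, Nat.testBit_shiftRight, Nat.testBit_two_pow_sub_one]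
  rcases k with _ | k
  · simp [hd]
  · simp [Nat.testBit_succ]

theorem pv_bit_le_one (w k : Nat) : pvBit w k ≤ 1 := Nat.and_le_right

theorem pv_shifted_bit_small (b e : Nat) (hb : b ≤ 1) (he : e < 16) : b <<< e < 65536 := by
  rw [Nat.shiftLeft_eq]
  calc b * 2^e ≤ 1 * 2^e := Nat.mul_le_mul_right _ hb
    _ = 2^e := by ring
    _ ≤ 2^15 := Nat.pow_le_pow_right (by norm_num) (by omega)
    _ < 65536 := by norm_num

theorem pv_shifted_bit_mask_zero (b e : Nat) (hb : b ≤ 1) (he : 16 ≤ e) : (b <<< e) &&& 65535 = 0 := by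
  rw [Nat.shiftLeft_eq, show (65535:Nat) = 2^16 - 1 by norm_num, Nat.and_two_pow_sub_one_eq_mod,
    show 2^e = 2^(e-16) * 2^16 by rw [← pow_add]; congr 1; omega, ← Nat.mul_assoc, Nat.mul_mod_left]

theorem pv_and_65535_small (x : Nat) (h : x < 65536) : x &&& 65535 = x := by
  rw [show (65535:Nat) = 2^16 - 1 by norm_num, Nat.and_two_pow_sub_one_eq_mod]
  exact Nat.mod_eq_of_lt (by omega)

theorem pv_or_lt (x y : Nat) (hx : x < 65536) (hy : y < 65536) : x ||| y < 65536 := by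
  have := Nat.or_lt_two_pow (x := x) (y := y) (n := 16) (by omega) (by omega)
  omega

-- De Morgan over the whole lane fold
theorem pv_laneA_xor (s : Nat) (E : List (Int × Int)) :
    ∀ acc, acc < 65536 → pvLaneA s E acc ^^^ 65535 = pvLaneO s E (acc ^^^ 65535) := by
  induction E with
  | nil => intro acc _; simp [pvLaneA, pvLaneO]
  | cons p E ih =>
    intro acc hacc
    have hle : acc &&& ((pvBit s (15 - p.1).toNat <<< (15 - p.2).toNat) ^^^ 65535) ≤ acc :=
      Nat.and_le_left
    simp only [pvLaneA, pvLaneO, List.foldl_cons] at *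
    rw [ih _ (by omega), pv_demorgan_step _ _ hacc]

-- the single packed pass computes all three lane folds at once
theorem pv_or_shuffle (r0 r1 r2 b0 b1 b2 e : Nat) :
    ((r2 <<< 32) ||| (r1 <<< 16) ||| r0) ||| ((b0 ||| (b1 <<< 16) ||| (b2 <<< 32)) <<< e) =
    ((r2 ||| (b2 <<< e)) <<< 32) ||| ((r1 ||| (b1 <<< e)) <<< 16) ||| (r0 ||| (b0 <<< e)) := by
  have hswap : ∀ x m n : Nat, (x <<< m) <<< n = (x <<< n) <<< m := fun x m n => by
    rw [← Nat.shiftLeft_add, ← Nat.shiftLeft_add, Nat.add_comm]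
  rw [Nat.shiftLeft_or_distrib, Nat.shiftLeft_or_distrib, hswap b1, hswap b2,
      Nat.shiftLeft_or_distrib, Nat.shiftLeft_or_distrib]
  simp [Nat.or_assoc, Nat.or_comm, Nat.or_left_comm]

set_option maxHeartbeats 1000000 in
theorem pv_pack_main (w : Nat) (E : List (Int × Int))
    (hE : ∀ p ∈ E, 0 ≤ p.1 ∧ p.1 ≤ 15 ∧ p.2 ≤ 15) :
    ∀ r0 r1 r2, r0 < 65536 → r1 < 65536 → r2 < 65536 →
      pvPackB w E ((r2 <<< 32) ||| (r1 <<< 16) ||| r0) =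
        (pvLaneO ((w >>> 32) &&& 65535) E r2 <<< 32) |||
        (pvLaneO ((w >>> 16) &&& 65535) E r1 <<< 16) |||
        pvLaneO ((w >>> 0) &&& 65535) E r0 := by
  induction E with
  | nil => intro r0 r1 r2 _ _ _; simp [pvPackB, pvLaneO]
  | cons p E ih =>
    obtain ⟨j, bp⟩ := p
    have hp := hE (j, bp) (List.mem_cons_self ..)
    have hE' : ∀ p ∈ E, 0 ≤ p.1 ∧ p.1 ≤ 15 ∧ p.2 ≤ 15 := fun p hp => hE p (List.mem_cons_of_mem _ hp)
    intro r0 r1 r2 h0 h1 h2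
    simp only [pvPackB, pvLaneO, List.foldl_cons] at *
    have hd16 : (15 - j).toNat < 16 := by omega
    by_cases hbp : (0:Int) ≤ bp
    · have hcond : ((0:Int) ≤ bp ∧ bp < 16) := ⟨hbp, by omega⟩
      rw [if_pos hcond]
      have he16 : (15 - bp).toNat < 16 := by omega
      have hx0 : pvBit ((w >>> 0) &&& 65535) (15 - j).toNat <<< (15 - bp).toNat < 65536 :=
        pv_shifted_bit_small _ _ (pv_bit_le_one _ _) he16
      have hx1 : pvBit ((w >>> 16) &&& 65535) (15 - j).toNat <<< (15 - bp).toNat < 65536 :=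
        pv_shifted_bit_small _ _ (pv_bit_le_one _ _) he16
      have hx2 : pvBit ((w >>> 32) &&& 65535) (15 - j).toNat <<< (15 - bp).toNat < 65536 :=
        pv_shifted_bit_small _ _ (pv_bit_le_one _ _) he16
      rw [pv_and_65535_small _ hx0, pv_and_65535_small _ hx1, pv_and_65535_small _ hx2]
      rw [pv_and_split w (15 - j).toNat,
        show pvBit w (15 - j).toNat = pvBit ((w >>> 0) &&& 65535) (15 - j).toNat from by
          rw [pv_bit_lane w 0 _ hd16, Nat.zero_add],
        ← pv_bit_lane w 16 _ hd16, ← pv_bit_lane w 32 _ hd16, pv_or_shuffle]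
      exact ih hE' _ _ _ (pv_or_lt _ _ h0 hx0) (pv_or_lt _ _ h1 hx1) (pv_or_lt _ _ h2 hx2)
    · rw [if_neg (by tauto)]
      have he16 : 16 ≤ (15 - bp).toNat := by omega
      rw [pv_shifted_bit_mask_zero _ _ (pv_bit_le_one _ _) he16,
        pv_shifted_bit_mask_zero _ _ (pv_bit_le_one _ _) he16,
        pv_shifted_bit_mask_zero _ _ (pv_bit_le_one _ _) he16]
      simp only [Nat.or_zero]
      exact ih hE' _ _ _ h0 h1 h2

-- casts: the Int folds of the two ports are the casts of the Nat folds
theorem pv_castA (s : Nat) (E : List (Int × Int)) :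
    ∀ acc : Nat, E.foldl (fun acc jb =>
      PySem.Int.band acc (PySem.Int.bxor
        ((PySem.Int.band ((s : Int) >>> (15 - jb.1).toNat) 1) <<< (15 - jb.2).toNat) 65535))
        (acc : Int) = ((pvLaneA s E acc : Nat) : Int) := by
  induction E with
  | nil => intro acc; simp [pvLaneA]
  | cons p E ih =>
    intro acc
    simp only [pvLaneA, List.foldl_cons, Int.shiftRight_natCast_right,
      Int.shiftLeft_natCast_right] at *
    rw [show PySem.Int.band (acc : Int) (PySem.Int.bxor
        ((PySem.Int.band ((s : Int) >>> (15 - p.1).toNat) 1) <<< (15 - p.2).toNat) 65535)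
      = ((acc &&& ((pvBit s (15 - p.1).toNat <<< (15 - p.2).toNat) ^^^ 65535) : Nat) : Int) from by
        rw [← Int.natCast_shiftRight, show (1:Int) = ((1:Nat):Int) by norm_num,
          PySem.Int.band_natCast, ← Int.natCast_shiftLeft,
          show (65535:Int) = ((65535:Nat):Int) by norm_num,
          PySem.Int.bxor_natCast, PySem.Int.band_natCast, pvBit], ih]

theorem pv_castB (w : Nat) (E : List (Int × Int)) :
    ∀ R : Nat, E.foldl (fun (result : Int) (jb : Int × Int) =>
      if (0:Int) ≤ jb.2 ∧ jb.2 < 16 then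
        PySem.Int.bor result
          ((PySem.Int.band ((w : Int) >>> (15 - jb.1).toNat) 4295032833) <<< (15 - jb.2).toNat)
      else result) (R : Int) = ((pvPackB w E R : Nat) : Int) := by
  induction E with
  | nil => intro R; simp [pvPackB]
  | cons p E ih =>
    intro R
    simp only [pvPackB, List.foldl_cons] at *
    by_cases hc : (0:Int) ≤ p.2 ∧ p.2 < 16
    · rw [if_pos hc, if_pos hc,
        show PySem.Int.bor (R : Int)
            ((PySem.Int.band ((w : Int) >>> (15 - p.1).toNat) 4295032833) <<< (15 - p.2).toNat)
          = ((R ||| (((w >>> (15 - p.1).toNat) &&& 4295032833) <<< (15 - p.2).toNat) : Nat) : Int) from by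
            rw [← Int.natCast_shiftRight, show (4295032833:Int) = ((4295032833:Nat):Int) by norm_num,
              PySem.Int.band_natCast, ← Int.natCast_shiftLeft, PySem.Int.bor_natCast], ih]
    · rw [if_neg hc, if_neg hc, ih]

-- ===== VERDICT (by name: the statement is the Claim_ definition above) =====
theorem do_permutation_spec : Claim_equal_do_permutation := by
  intro data_bytes permutation hdom hpre
  unfold Spec_do_permutation
  obtain ⟨hlen, hbp⟩ := hpre
  have hE : ∀ q ∈ PySem.List.enumerate permutation 0, 0 ≤ q.1 ∧ q.1 ≤ 15 ∧ q.2 ≤ 15 := by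
    intro q hq
    rw [PySem.List.mem_enumerate_iff] at hq
    obtain ⟨k, hk, rfl⟩ := hq
    exact ⟨by omega, by omega, hbp _ (permutation.getElem_mem hk)⟩
  simp only [do_permutation, do_permutation_alt,
    show PySem.List.pyRange 0 48 16 = [0, 16, 32] from by decide,
    show PySem.List.pyRange 0 3 1 = [0, 1, 2] from by decide,
    List.map_cons, List.map_nil, List.foldl_cons, List.foldl_nil,
    show ((0:Int)).toNat = 0 from rfl, show ((1:Int)).toNat = 1 from rfl,
    show ((2:Int)).toNat = 2 from rfl, show ((16:Int)).toNat = 16 from rfl,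
    show ((32:Int)).toNat = 32 from rfl,
    show ∀ a b c x : Int, ([a, b, c].set 0 x) = [x, b, c] from fun _ _ _ _ => rfl,
    show ∀ a b c x : Int, ([a, b, c].set 1 x) = [a, x, c] from fun _ _ _ _ => rfl,
    show ∀ a b c x : Int, ([a, b, c].set 2 x) = [a, b, x] from fun _ _ _ _ => rfl,
    show ∀ a b c : Int, PySem.List.pyGetD [a, b, c] 0 0 = a from fun _ _ _ => rfl,
    show ∀ a b c : Int, PySem.List.pyGetD [a, b, c] 1 0 = b from fun _ _ _ => rfl,
    show ∀ a b c : Int, PySem.List.pyGetD [a, b, c] 2 0 = c from fun _ _ _ => rfl,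
    Int.shiftRight_natCast_right, Int.shiftLeft_natCast_right]
  rw [pv_band_2p48 data_bytes, pv_band_65535 (data_bytes >>> (32:Nat)),
    pv_band_65535 (data_bytes >>> (16:Nat)), pv_band_65535 (data_bytes >>> (0:Nat)),
    pv_lane_of_word data_bytes 32 (by tauto), pv_lane_of_word data_bytes 16 (by tauto),
    pv_lane_of_word data_bytes 0 (by tauto)]
  have hA2 := pv_castA (((data_bytes % 281474976710656).toNat >>> 32) &&& 65535)
    (PySem.List.enumerate permutation) 65535
  have hA1 := pv_castA (((data_bytes % 281474976710656).toNat >>> 16) &&& 65535)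
    (PySem.List.enumerate permutation) 65535
  have hA0 := pv_castA (((data_bytes % 281474976710656).toNat >>> 0) &&& 65535)
    (PySem.List.enumerate permutation) 65535
  have hB := pv_castB (data_bytes % 281474976710656).toNat (PySem.List.enumerate permutation) 0
  simp only [Nat.cast_ofNat, Nat.cast_zero, Int.shiftRight_natCast_right,
    Int.shiftLeft_natCast_right] at hA2 hA1 hA0 hB
  rw [hA2, hA1, hA0, hB]
  rw [show (65535:Int) = ((65535:Nat):Int) from by norm_num]
  simp only [PySem.Int.bxor_natCast]
  rw [pv_laneA_xor _ _ 65535 (by norm_num), pv_laneA_xor _ _ 65535 (by norm_num),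
    pv_laneA_xor _ _ 65535 (by norm_num)]
  simp only [Nat.xor_self]
  rw [show (32:Int) = ((32:Nat):Int) from by norm_num,
    show (16:Int) = ((16:Nat):Int) from by norm_num]
  simp only [Int.shiftLeft_natCast_right, ← Int.natCast_shiftLeft, PySem.Int.bor_natCast]
  rw [Nat.cast_inj]
  have hmain := pv_pack_main (data_bytes % 281474976710656).toNat _ hE 0 0 0
    (by norm_num) (by norm_num) (by norm_num)
  simp only [Nat.zero_shiftLeft, Nat.or_zero] at hmain
  exact hmain.symm
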